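-- pv_equiv track=rewrite | github.com/bitaan/Tic_tac_toe-game | Mini_Project-2 - Tic Tac Toe Proj/win_lose.py | diag_check
-- ===== SOURCE A (Python) =====
-- def diag_check(diag):
--     (c_1,c_2) = (0, 0)
--     for i in range(0, 3):
--         if diag[i] == 'X':
--             c_1 += 1
--         elif diag[i] == 'o':
--             c_2 += 1
--     if c_1 == 3:
--         return 1
--     elif c_2 == 3:
--         return 2
--     else:
--         return None
-- ===== SOURCE B (Python) =====
-- def diag_check(diag):
--     if diag[0] == diag[1] == diag[2] == 'X':
--         return 1
--     if diag[0] == diag[1] == diag[2] == 'o':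
--         return 2
--     return None
-- ===== Notes on version B (the rewrite author's own statement) =====
-- stated objective: simpler
-- what changed: Replaces the two-counter counting loop with a direct chained-equality check of the three fixed cells against 'X' and 'o'.
import Mathlib
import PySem

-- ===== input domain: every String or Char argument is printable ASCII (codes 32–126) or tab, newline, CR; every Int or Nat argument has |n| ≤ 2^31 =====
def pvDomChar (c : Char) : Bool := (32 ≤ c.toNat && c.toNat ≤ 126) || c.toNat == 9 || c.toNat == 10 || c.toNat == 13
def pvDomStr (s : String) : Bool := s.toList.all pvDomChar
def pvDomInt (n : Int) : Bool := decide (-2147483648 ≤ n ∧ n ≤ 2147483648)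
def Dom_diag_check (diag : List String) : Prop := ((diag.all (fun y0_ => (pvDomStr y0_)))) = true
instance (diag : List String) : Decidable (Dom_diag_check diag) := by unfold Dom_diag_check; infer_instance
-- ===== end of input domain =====

-- B replaces A's two-counter counting loop by a direct chained-equality check of the three fixed cells (simpler).

-- ===== PORT A =====
-- counting loop over range(0,3); pyGet? none (Python IndexError) is excluded by Pre_
def diag_check (diag : List String) : Option Int :=
  let cs := (PySem.List.pyRange 0 3 1).foldl (fun (c : Int × Int) i =>
    match PySem.List.pyGet? diag i with
    | some v => if v = "X" then (c.1 + 1, c.2) else if v = "o" then (c.1, c.2 + 1) else c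
    | none => c) (0, 0)
  if cs.1 = 3 then some 1
  else if cs.2 = 3 then some 2
  else none

-- ===== PORT B =====
def diag_check_alt (diag : List String) : Option Int :=
  match PySem.List.pyGet? diag 0, PySem.List.pyGet? diag 1, PySem.List.pyGet? diag 2 with
  | some a, some b, some c =>
      if a = b ∧ b = c ∧ c = "X" then some 1
      else if a = b ∧ b = c ∧ c = "o" then some 2
      else none
  | _, _, _ => none

-- ===== PRECONDITION & SPEC =====
-- Pre_ excludes lists with fewer than 3 elements, on which Python A raises IndexError.
def Pre_diag_check (diag : List String) : Prop := 3 ≤ diag.length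
instance (diag : List String) : Decidable (Pre_diag_check diag) := by unfold Pre_diag_check; infer_instance
def pvWitness_diag_check : List String := ["X", "X", "X"]
def Spec_diag_check (diag : List String) (out : Option Int) : Prop := out = diag_check_alt diag
instance (diag : List String) (out : Option Int) : Decidable (Spec_diag_check diag out) := by unfold Spec_diag_check; infer_instance

-- ===== CLAIM (what is proved, stated in full; the proofs are below) =====
def Claim_equal_diag_check : Prop := ∀ (diag : List String), Dom_diag_check diag → Pre_diag_check diag → Spec_diag_check diag (diag_check diag)

-- ===== LEMMAS AND PROOFS =====
set_option maxHeartbeats 2000000 in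
theorem diag_check_eq_alt_of_cons (a b c : String) (rest : List String) :
    diag_check (a :: b :: c :: rest) = diag_check_alt (a :: b :: c :: rest) := by
  have h1 : PySem.List.pyGet? (a::b::c::rest) 1 = some b := by
    have := PySem.List.pyGet?_ofNat (xs := a::b::c::rest) (n := 1) (by simp)
    simpa using this
  have h2 : PySem.List.pyGet? (a::b::c::rest) 2 = some c := by
    have := PySem.List.pyGet?_ofNat (xs := a::b::c::rest) (n := 2) (by simp)
    simpa using this
  unfold diag_check diag_check_alt
  rw [show PySem.List.pyRange 0 3 1 = [0,1,2] from by decide]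
  simp only [List.foldl, PySem.List.pyGet?_zero_cons, h1, h2]
  by_cases hax : a = "X" <;> by_cases hbx : b = "X" <;> by_cases hcx : c = "X" <;>
    by_cases hao : a = "o" <;> by_cases hbo : b = "o" <;> by_cases hco : c = "o" <;>
    simp_all

-- ===== VERDICT (by name: the statement is the Claim_ definition above) =====
theorem diag_check_spec : Claim_equal_diag_check := by
  intro diag _ hpre
  match diag with
  | a :: b :: c :: rest => exact diag_check_eq_alt_of_cons a b c rest
  | [] => simp [Pre_diag_check] at hpre
  | [_] => simp [Pre_diag_check] at hpre
  | [_, _] => simp [Pre_diag_check] at hpre
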